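-- pv_equiv track=rewrite | github.com/mosyaoleg/SpRzOM | SpRZoM4.py | mul_pol
-- ===== SOURCE A (Python) =====
-- def Matrix(a):
--     m = len(a)
--     p = 2 * m + 1
--     mat = []
--     for i in range(m):
--         mat.append([])
--         for j in range(m):
--             if ((2 ** i) + (2 ** j)) % p == 1 or ((2 ** i) - (2 ** j)) % p == 1 or (-(2 ** i) + (2 ** j)) % p == 1 or (-(2 ** i) - (2 ** j)) % p == 1:
--                 mat[i].append(1)
--             else:
--                 mat[i].append(0)
--     return mat
--
-- def mul_pol(a, b):
--     mat = Matrix(a)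
--     d = []
--     for k in range(len(a)):
--         c = []
--         for i in range(len(a)):
--             suma = 0
--             for j in range(len(a)):
--                 suma += a[j] * mat[j][i]
--             c.append(suma % 2)
--         suma = 0
--         for i in range(len(c)):
--             suma += c[i] * b[i]
--         d.append(suma % 2)
--         x = a[0]
--         del a[0]
--         a.append(x)
--         y = b[0]
--         del b[0]
--         b.append(y)
--     return d
-- ===== SOURCE B (Python) =====
-- def mul_pol(a, b):
--     m = len(a)
--     p = 2 * m + 1
--     pw = [pow(2, i, p) for i in range(m)]
--     pairs = [(j, i)
--              for j in range(m) for i in range(m)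
--              if (pw[j] + pw[i]) % p == 1 or (pw[j] - pw[i]) % p == 1
--              or (-pw[j] + pw[i]) % p == 1 or (-pw[j] - pw[i]) % p == 1]
--     n = len(b)
--     return [sum(a[(j + k) % m] * b[(i + k) % n] for (j, i) in pairs) % 2
--             for k in range(m)]
-- ===== Notes on version B (the rewrite author's own statement) =====
-- stated objective: faster
-- what changed: Instead of rebuilding the dense m*m multiplication matrix product under m in-place rotations (with huge 2**i integers), B precomputes the sparse nonzero positions of the matrix once using pow(2,i,p) and, for each output bit, sums only those O(m) positions with rotated indexing (j+k)%m, (i+k)%n.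
import Mathlib
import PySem

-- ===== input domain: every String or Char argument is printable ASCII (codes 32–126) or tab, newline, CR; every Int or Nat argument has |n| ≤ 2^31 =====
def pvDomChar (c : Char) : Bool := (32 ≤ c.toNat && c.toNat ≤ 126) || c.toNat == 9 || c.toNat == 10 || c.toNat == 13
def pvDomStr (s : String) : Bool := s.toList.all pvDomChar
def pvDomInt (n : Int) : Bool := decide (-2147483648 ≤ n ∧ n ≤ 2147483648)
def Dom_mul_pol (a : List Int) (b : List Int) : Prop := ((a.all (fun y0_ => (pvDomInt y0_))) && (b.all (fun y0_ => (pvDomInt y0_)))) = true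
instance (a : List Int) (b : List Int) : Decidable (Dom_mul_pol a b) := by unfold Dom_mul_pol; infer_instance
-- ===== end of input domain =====

-- B replaces A's m in-place rotations with a once-computed sparse position list and pow(2,i,p)
-- (measured much faster); equivalence is about the RETURN value only: A rotates its arguments in
-- place (b stays net-rotated by len(a) mod len(b)), B leaves them untouched.

-- ===== PORT A =====
-- the 4-way congruence test both Python sources write out textually
def pvCond (p : Int) (x y : Int) : Bool :=
  PySem.Int.mod (x + y) p == 1 || PySem.Int.mod (x - y) p == 1 ||
  PySem.Int.mod (-x + y) p == 1 || PySem.Int.mod (-x - y) p == 1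

def pvMatrix (a : List Int) : List (List Int) :=
  let m := a.length
  let p : Int := 2 * (m : Int) + 1
  (List.range m).map (fun i => (List.range m).map (fun j =>
    if pvCond p (2 ^ i) (2 ^ j) then 1 else 0))

-- one pass of A's k-loop body: x = a[0]; del a[0]; a.append(x)  ⇒  x.tail ++ x.take 1
def pvRot (l : List Int) : List Int := l.tail ++ l.take 1

-- the value A appends to d in one pass (x, y = current rotated a, b)
def pvEntryA (mat : List (List Int)) (x y : List Int) : Int :=
  let m := x.length
  let c := (List.range m).map (fun (i : Nat) =>
    PySem.Int.mod ((List.range m).foldl (fun s (j : Nat) =>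
      s + PySem.List.pyGetD x (j : Int) 0 *
          PySem.List.pyGetD (PySem.List.pyGetD mat (j : Int) []) (i : Int) 0) 0) 2)
  PySem.Int.mod ((List.range c.length).foldl (fun s (i : Nat) =>
    s + PySem.List.pyGetD c (i : Int) 0 * PySem.List.pyGetD y (i : Int) 0) 0) 2

def pvStepA (mat : List (List Int)) (st : List Int × List Int × List Int) :
    List Int × List Int × List Int :=
  (pvRot st.1, pvRot st.2.1, st.2.2 ++ [pvEntryA mat st.1 st.2.1])

def mul_pol (a : List Int) (b : List Int) : List Int :=
  let mat := pvMatrix a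
  ((List.range a.length).foldl (fun st _k => pvStepA mat st) (a, b, [])).2.2

-- ===== PORT B =====
def mul_pol_alt (a : List Int) (b : List Int) : List Int :=
  let m := a.length
  let p : Int := 2 * (m : Int) + 1
  let pw := (List.range m).map (fun i => PySem.Int.powMod 2 i p)
  let pairs := (List.range m).flatMap (fun j =>
    ((List.range m).filter (fun i =>
      pvCond p (pw.getD j 0) (pw.getD i 0))).map (fun i => (j, i)))
  let n := b.length
  (List.range m).map (fun k =>
    PySem.Int.mod ((pairs.map (fun ji =>
      a.getD ((ji.1 + k) % m) 0 * b.getD ((ji.2 + k) % n) 0)).sum) 2)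

-- ===== PRECONDITION & SPEC =====
-- Pre_ excludes only inputs where A raises IndexError: a nonempty with b shorter than a
-- (b[i] for i < len(a), and the rotation b[0] on an empty b).
def Pre_mul_pol (a : List Int) (b : List Int) : Prop := a = [] ∨ a.length ≤ b.length
instance (a : List Int) (b : List Int) : Decidable (Pre_mul_pol a b) := by
  unfold Pre_mul_pol; infer_instance

def pvWitness_mul_pol : List Int × List Int := ([1, 0], [1, 1])

def Spec_mul_pol (a : List Int) (b : List Int) (out : List Int) : Prop := out = mul_pol_alt a b
instance (a : List Int) (b : List Int) (out : List Int) : Decidable (Spec_mul_pol a b out) := by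
  unfold Spec_mul_pol; infer_instance

-- ===== CLAIM (what is proved, stated in full; the proofs are below) =====
def Claim_equal_mul_pol : Prop := ∀ (a : List Int) (b : List Int), Dom_mul_pol a b → Pre_mul_pol a b → Spec_mul_pol a b (mul_pol a b)

-- ===== LEMMAS AND PROOFS =====

theorem pvRot_eq_rotate (l : List Int) : pvRot l = l.rotate 1 := by
  cases l with
  | nil => rfl
  | cons x xs =>
    rw [List.rotate_eq_drop_append_take (by simp)]
    simp [pvRot]

theorem pvFoldA (mat : List (List Int)) (L : List Nat) :
    ∀ (x y d : List Int),
      L.foldl (fun st _k => pvStepA mat st) (x, y, d)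
      = (x.rotate L.length, y.rotate L.length,
         d ++ (List.range L.length).map (fun t => pvEntryA mat (x.rotate t) (y.rotate t))) := by
  induction L with
  | nil => intro x y d; simp
  | cons k L ih =>
    intro x y d
    have h1 : ∀ (l : List Int) (t : Nat), (pvRot l).rotate t = l.rotate (t + 1) := by
      intro l t; rw [pvRot_eq_rotate, List.rotate_rotate, Nat.add_comm]
    calc (k :: L).foldl (fun st _k => pvStepA mat st) (x, y, d)
        = L.foldl (fun st _k => pvStepA mat st) (pvRot x, pvRot y, d ++ [pvEntryA mat x y]) := rfl
      _ = _ := by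
          rw [ih]
          simp [h1, List.range_succ_eq_map, List.map_map, Function.comp_def, List.append_assoc]

theorem pvRotGetD (l : List Int) (k j : Nat) (hj : j < l.length) :
    (l.rotate k).getD j 0 = l.getD ((j + k) % l.length) 0 := by
  have h1 : j < (l.rotate k).length := by simpa using hj
  have h2 : (j + k) % l.length < l.length := Nat.mod_lt _ (by omega)
  rw [List.getD_eq_getElem _ _ h1, List.getElem_rotate, List.getD_eq_getElem _ _ h2]

theorem pvMatGet (a : List Int) (j i : Nat) (hj : j < a.length) (hi : i < a.length) :
    ((pvMatrix a).getD j []).getD i 0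
    = if pvCond (2 * (a.length : Int) + 1) (2 ^ j) (2 ^ i) then 1 else 0 := by
  simp only [pvMatrix]
  rw [PySem.List.getD_map_range _ _ _ _ hj, PySem.List.getD_map_range _ _ _ _ hi]

theorem pvCondPow (m j i : Nat) :
    pvCond (2 * (m : Int) + 1) (PySem.Int.powMod 2 j (2 * (m : Int) + 1))
      (PySem.Int.powMod 2 i (2 * (m : Int) + 1))
    = pvCond (2 * (m : Int) + 1) (2 ^ j) (2 ^ i) := by
  set p : Int := 2 * (m : Int) + 1 with hp_def
  have hp : 0 < p := by positivity
  have h : ∀ e : Nat, Int.ModEq p ((2 : Int) ^ e % p) (2 ^ e) := fun e =>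
    Int.emod_emod_of_dvd _ dvd_rfl
  have e1 : ((2:Int) ^ j % p + 2 ^ i % p) % p = ((2:Int) ^ j + 2 ^ i) % p := (h j).add (h i)
  have e2 : ((2:Int) ^ j % p - 2 ^ i % p) % p = ((2:Int) ^ j - 2 ^ i) % p := (h j).sub (h i)
  have e3 : (-((2:Int) ^ j % p) + 2 ^ i % p) % p = (-((2:Int) ^ j) + 2 ^ i) % p :=
    (h j).neg.add (h i)
  have e4 : (-((2:Int) ^ j % p) - 2 ^ i % p) % p = (-((2:Int) ^ j) - 2 ^ i) % p :=
    (h j).neg.sub (h i)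
  rw [PySem.Int.powMod_eq_emod 2 j hp, PySem.Int.powMod_eq_emod 2 i hp]
  simp only [pvCond, PySem.Int.mod_eq_emod_of_pos hp, e1, e2, e3, e4]

theorem pvSumMapFlatMap (g : Nat → List (Nat × Nat)) (f : Nat × Nat → Int) (l : List Nat) :
    ((l.flatMap g).map f).sum = (l.map (fun j => (((g j).map f)).sum)).sum := by
  induction l with
  | nil => rfl
  | cons x l ih => simp [List.flatMap_cons, List.sum_append, ih]

theorem pvSumMapFilter (p : Nat → Bool) (f : Nat → Int) (l : List Nat) :
    ((l.filter p).map f).sum = (l.map (fun i => if p i then f i else 0)).sum := by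
  induction l with
  | nil => rfl
  | cons x l ih =>
    by_cases h : p x <;> simp [h, ih]

theorem pvLSum (f : Nat → Int) (n : Nat) :
    ((List.range n).map f).sum = ∑ i ∈ Finset.range n, f i := rfl

theorem pvModTerm (c y : Int) : ((c % 2) * y) % 2 = (c * y) % 2 := by
  conv_rhs => rw [Int.mul_emod]
  rw [Int.mul_emod, Int.emod_emod_of_dvd _ dvd_rfl]

-- the mod-2 / sum-swap core: dropping the inner %2 and exchanging the two summations
theorem pvSwap (m : Nat) (X Y : Nat → Int) (C : Nat → Nat → Bool) :
    (∑ i ∈ Finset.range m, ((∑ j ∈ Finset.range m, if C j i then X j else 0) % 2) * Y i) % 2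
    = (∑ j ∈ Finset.range m, ∑ i ∈ Finset.range m, if C j i then X j * Y i else 0) % 2 := by
  calc (∑ i ∈ Finset.range m, ((∑ j ∈ Finset.range m, if C j i then X j else 0) % 2) * Y i) % 2
      = (∑ i ∈ Finset.range m, (((∑ j ∈ Finset.range m, if C j i then X j else 0) % 2) * Y i) % 2) % 2 :=
        Finset.sum_int_mod _ 2 _
    _ = (∑ i ∈ Finset.range m, ((∑ j ∈ Finset.range m, if C j i then X j else 0) * Y i) % 2) % 2 := by
        simp only [pvModTerm]
    _ = (∑ i ∈ Finset.range m, (∑ j ∈ Finset.range m, if C j i then X j else 0) * Y i) % 2 :=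
        (Finset.sum_int_mod _ 2 _).symm
    _ = (∑ i ∈ Finset.range m, ∑ j ∈ Finset.range m, (if C j i then X j else 0) * Y i) % 2 := by
        simp only [Finset.sum_mul]
    _ = (∑ j ∈ Finset.range m, ∑ i ∈ Finset.range m, (if C j i then X j else 0) * Y i) % 2 := by
        rw [Finset.sum_comm]
    _ = (∑ j ∈ Finset.range m, ∑ i ∈ Finset.range m, if C j i then X j * Y i else 0) % 2 := by
        simp only [ite_mul, zero_mul]

-- A's pass value on the k-times-rotated lists, as a clean double Finset sum
theorem pvL (a b : List Int) (k : Nat) (ha : a ≠ []) (hb : a.length ≤ b.length) :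
    pvEntryA (pvMatrix a) (a.rotate k) (b.rotate k)
    = (∑ i ∈ Finset.range a.length,
        ((∑ j ∈ Finset.range a.length,
            if pvCond (2 * (a.length : Int) + 1) (2 ^ j) (2 ^ i)
            then a.getD ((j + k) % a.length) 0 else 0) % 2)
          * b.getD ((i + k) % b.length) 0) % 2 := by
  have hm : 0 < a.length := List.length_pos_iff.mpr ha
  have hc : ∀ i : Nat, i < a.length →
      PySem.Int.mod ((List.range a.length).foldl (fun s (j : Nat) =>
        s + (a.rotate k).getD j 0 * ((pvMatrix a).getD j []).getD i 0) 0) 2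
      = (∑ j ∈ Finset.range a.length,
          if pvCond (2 * (a.length : Int) + 1) (2 ^ j) (2 ^ i)
          then a.getD ((j + k) % a.length) 0 else 0) % 2 := by
    intro i hi
    rw [PySem.List.foldl_add, zero_add, PySem.Int.mod_eq_emod_of_pos (by norm_num), pvLSum]
    congr 1
    refine Finset.sum_congr rfl ?_
    intro j hj
    have hj' := Finset.mem_range.mp hj
    rw [pvRotGetD a k j hj', pvMatGet a j i hj' hi, mul_ite, mul_one, mul_zero]
  simp only [pvEntryA, List.length_rotate, List.length_map, List.length_range,
    PySem.List.pyGetD_natCast]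
  rw [PySem.List.foldl_add, zero_add, PySem.Int.mod_eq_emod_of_pos (by norm_num), pvLSum]
  congr 1
  refine Finset.sum_congr rfl ?_
  intro i hi
  have hi' := Finset.mem_range.mp hi
  rw [PySem.List.getD_map_range _ _ _ _ hi', hc i hi', pvRotGetD b k i (by omega)]

-- B's k-th entry, as the same double Finset sum without the inner %2
theorem pvR (a b : List Int) (k : Nat) :
    PySem.Int.mod
      ((((List.range a.length).flatMap (fun j =>
          ((List.range a.length).filter (fun i =>
            pvCond (2 * (a.length : Int) + 1)
              (((List.range a.length).map (fun t => PySem.Int.powMod 2 t (2 * (a.length : Int) + 1))).getD j 0)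
              (((List.range a.length).map (fun t => PySem.Int.powMod 2 t (2 * (a.length : Int) + 1))).getD i 0))).map
            (fun i => (j, i)))).map (fun ji =>
              a.getD ((ji.1 + k) % a.length) 0 * b.getD ((ji.2 + k) % b.length) 0)).sum) 2
    = (∑ j ∈ Finset.range a.length, ∑ i ∈ Finset.range a.length,
        if pvCond (2 * (a.length : Int) + 1) (2 ^ j) (2 ^ i)
        then a.getD ((j + k) % a.length) 0 * b.getD ((i + k) % b.length) 0 else 0) % 2 := by
  rw [PySem.Int.mod_eq_emod_of_pos (by norm_num), pvSumMapFlatMap, pvLSum]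
  congr 1
  refine Finset.sum_congr rfl ?_
  intro j hj
  have hj' := Finset.mem_range.mp hj
  rw [List.map_map, pvSumMapFilter, pvLSum]
  refine Finset.sum_congr rfl ?_
  intro i hi
  have hi' := Finset.mem_range.mp hi
  rw [PySem.List.getD_map_range _ _ _ _ hj', PySem.List.getD_map_range _ _ _ _ hi']
  simp only [Function.comp_apply, pvCondPow]

-- the per-output-bit equality: A's pass on the k-times-rotated lists equals B's k-th entry
theorem pvEntry_eq (a b : List Int) (k : Nat) (ha : a ≠ []) (hb : a.length ≤ b.length) :
    pvEntryA (pvMatrix a) (a.rotate k) (b.rotate k)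
    = PySem.Int.mod
        ((((List.range a.length).flatMap (fun j =>
            ((List.range a.length).filter (fun i =>
              pvCond (2 * (a.length : Int) + 1)
                (((List.range a.length).map (fun t => PySem.Int.powMod 2 t (2 * (a.length : Int) + 1))).getD j 0)
                (((List.range a.length).map (fun t => PySem.Int.powMod 2 t (2 * (a.length : Int) + 1))).getD i 0))).map
              (fun i => (j, i)))).map (fun ji =>
                a.getD ((ji.1 + k) % a.length) 0 * b.getD ((ji.2 + k) % b.length) 0)).sum) 2 := by
  rw [pvL a b k ha hb, pvR a b k, pvSwap]

-- ===== VERDICT (by name: the statement is the Claim_ definition above) =====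
theorem mul_pol_spec : Claim_equal_mul_pol := by
  intro a b _hdom hpre
  unfold Spec_mul_pol
  by_cases ha : a = []
  · subst ha; simp [mul_pol, mul_pol_alt]
  · have hb : a.length ≤ b.length := by
      cases hpre with
      | inl h => exact absurd h ha
      | inr h => exact h
    simp only [mul_pol, mul_pol_alt]
    rw [pvFoldA]
    simp only [List.length_range, List.nil_append]
    apply List.map_congr_left
    intro t _ht
    exact pvEntry_eq a b t ha hb
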